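-- pv_equiv track=rewrite | github.com/DleanJeans/Jenna | cogs/cmds/emotes/spell.py | replace_text_with_alternative_emojis
-- ===== SOURCE A (Python) =====
-- ALTERNATIVES = {
--     'ABC': '🔤',
--     'AB': '🆎',
--     'COOL': '🆒',
--     'FREE': '🆓',
--     'ID': '🆔',
--     'NEW': '🆕',
--     'OK': '🆗',
--     'OO': '➿',
--     'SOS': '🆘',
--     'UP': '🆙',
--     'VS': '🆚',
--     'WC': '🚾',
--     'A': '🅰',
--     'B': '🅱',
--     'C': '☪',
--     'H': '♓',
--     'M': ['Ⓜ', '♍'],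
--     'N': '♑',
--     'O': ['🅾', '⭕'],
--     'P': '🅿',
--     'T': '✝',
--     'U': '⛎',
--     'V': '♈',
--     'X': ['❎', '❌'],
--     '!!': '‼',
--     '!?': '⁉',
--     '!': ['❗', '❕'],
--     '?': ['❓', '❔'],
-- }
--
-- def replace_text_with_alternative_emojis(text):
--     text = text.upper()
--     for a, emotes in ALTERNATIVES.items():
--         if a not in text: continue
--         is_letter = a.isalpha() and len(a) == 1
--         if is_letter and text.count(a) < 2: continue
--         for e in emotes:
--             text = replace_nth(text, a, e, 2 if is_letter else 1)
--     return text
--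
-- def replace_nth(s, sub, repl, n):
--     find = s.find(sub)
--     i = find != -1
--     while find != -1 and i != n:
--         find = s.find(sub, find + 1)
--         i += 1
--     if find >= 0 and i == n:
--         return s[:find] + repl + s[find+len(sub):]
--     return s
-- ===== SOURCE B (Python) =====
-- ALTERNATIVES = {
--     'ABC': '🔤',
--     'AB': '🆎',
--     'COOL': '🆒',
--     'FREE': '🆓',
--     'ID': '🆔',
--     'NEW': '🆕',
--     'OK': '🆗',
--     'OO': '➿',
--     'SOS': '🆘',
--     'UP': '🆙',
--     'VS': '🆚',
--     'WC': '🚾',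
--     'A': '🅰',
--     'B': '🅱',
--     'C': '☪',
--     'H': '♓',
--     'M': ['Ⓜ', '♍'],
--     'N': '♑',
--     'O': ['🅾', '⭕'],
--     'P': '🅿',
--     'T': '✝',
--     'U': '⛎',
--     'V': '♈',
--     'X': ['❎', '❌'],
--     '!!': '‼',
--     '!?': '⁉',
--     '!': ['❗', '❕'],
--     '?': ['❓', '❔'],
-- }
--
-- def replace_nth(s, sub, repl, n):
--     # positions of all (overlapping) occurrences of sub in s, in increasing order
--     positions = [i for i in range(len(s) + 1) if s.startswith(sub, i)]
--     if n < 1 or len(positions) < n: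
--         return s
--     p = positions[n - 1]
--     return s[:p] + repl + s[p + len(sub):]
--
-- def replace_text_with_alternative_emojis(text):
--     text = text.upper()
--     for a, emotes in ALTERNATIVES.items():
--         needed = 2 if (len(a) == 1 and a.isalpha()) else 1
--         if text.count(a) < needed:
--             continue
--         for e in emotes:
--             text = replace_nth(text, a, e, needed)
--     return text
-- ===== Notes on version B (the rewrite author's own statement) =====
-- stated objective: simpler
-- what changed: replace_nth no longer walks the text with a stateful repeated s.find loop: B lists every (overlapping) match position in one comprehension and indexes the nth, and the outer loop's two guards ('a not in text' and the letter count<2 check) are merged into a single count-threshold test.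
import Mathlib
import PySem

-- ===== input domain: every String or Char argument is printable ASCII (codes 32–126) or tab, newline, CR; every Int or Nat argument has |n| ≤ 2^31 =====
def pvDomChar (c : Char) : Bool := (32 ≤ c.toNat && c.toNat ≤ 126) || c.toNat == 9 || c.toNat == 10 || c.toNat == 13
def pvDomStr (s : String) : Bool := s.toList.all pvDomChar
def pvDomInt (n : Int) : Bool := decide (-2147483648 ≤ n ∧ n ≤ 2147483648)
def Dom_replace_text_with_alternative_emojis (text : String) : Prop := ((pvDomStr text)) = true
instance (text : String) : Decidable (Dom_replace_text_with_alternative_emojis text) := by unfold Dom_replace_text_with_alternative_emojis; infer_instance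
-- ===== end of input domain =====

-- B replaces A's index-counting find-loop helper by "list every (overlapping) match
-- position, index the nth" and merges A's two guards into one count threshold;
-- objective: simpler (same asymptotic cost).

-- ===== PORT A =====
-- the ALTERNATIVES dict, shared data for both ports; every str value is a single
-- character, so Python's iteration over it yields exactly that one string
def pvALT : List (String × List String) :=
  [("ABC", ["🔤"]), ("AB", ["🆎"]), ("COOL", ["🆒"]), ("FREE", ["🆓"]),
   ("ID", ["🆔"]), ("NEW", ["🆕"]), ("OK", ["🆗"]), ("OO", ["➿"]),
   ("SOS", ["🆘"]), ("UP", ["🆙"]), ("VS", ["🆚"]), ("WC", ["🚾"]),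
   ("A", ["🅰"]), ("B", ["🅱"]), ("C", ["☪"]), ("H", ["♓"]),
   ("M", ["Ⓜ", "♍"]), ("N", ["♑"]), ("O", ["🅾", "⭕"]), ("P", ["🅿"]),
   ("T", ["✝"]), ("U", ["⛎"]), ("V", ["♈"]), ("X", ["❎", "❌"]),
   ("!!", ["‼"]), ("!?", ["⁉"]), ("!", ["❗", "❕"]), ("?", ["❓", "❔"])]

-- the 'while find != -1 and i != n' loop of A's replace_nth; fuel only makes the
-- recursion structural (s.length + 2 iterations always suffice, see the lemmas)
def pvReplLoopA (s sub : List Char) (n : Int) : Nat → Int → Int → Int × Int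
  | 0, find, i => (find, i)
  | fuel + 1, find, i =>
    if find ≠ -1 ∧ i ≠ n then
      pvReplLoopA s sub n fuel (PySem.Chars.findFrom s sub (find + 1) none) (i + 1)
    else (find, i)

def pvReplaceNthA (s sub repl : List Char) (n : Int) : List Char :=
  let find := PySem.Chars.find s sub
  let i : Int := if find ≠ -1 then 1 else 0   -- bool used as int
  let r := pvReplLoopA s sub n (s.length + 2) find i
  if 0 ≤ r.1 ∧ r.2 = n then
    PySem.List.slice s none (some r.1) ++ repl ++ PySem.List.slice s (some (r.1 + sub.length)) none
  else s

-- the body of A's 'for a, emotes in ALTERNATIVES.items()' loop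
def pvStepA (t : List Char) (kv : String × List String) : List Char :=
  let a := kv.1.toList
  if PySem.Chars.isIn a t = false then t       -- 'if a not in text: continue'
  else
    let isLetter := PySem.Chars.strIsalpha a && a.length == 1
    if isLetter && PySem.Chars.count t a < 2 then t
    else kv.2.foldl (fun t e => pvReplaceNthA t a e.toList (if isLetter then 2 else 1)) t

def replace_text_with_alternative_emojis (text : String) : String :=
  String.ofList (pvALT.foldl pvStepA (PySem.Chars.upper text.toList))

-- ===== PORT B =====
-- '[i for i in range(len(s) + 1) if s.startswith(sub, i)]'
-- (s.startswith(sub, i) for 0 ≤ i ≤ len(s) is exactly: sub is a prefix of s dropped by i)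
def pvOcc (s sub : List Char) : List Nat :=
  (List.range (s.length + 1)).filter (fun i => PySem.Chars.startswith (s.drop i) sub)

def pvReplaceNthB (s sub repl : List Char) (n : Int) : List Char :=
  let positions := pvOcc s sub
  if n < 1 ∨ (positions.length : Int) < n then s
  else
    match positions[(n - 1).toNat]? with     -- 'p = positions[n - 1]', in range here
    | some p => s.take p ++ repl ++ s.drop (p + sub.length)
    | none => s

-- the body of B's loop: one count threshold instead of A's two guards
def pvStepB (t : List Char) (kv : String × List String) : List Char :=
  let a := kv.1.toList
  let needed : Int := if a.length == 1 && PySem.Chars.strIsalpha a then 2 else 1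
  if (PySem.Chars.count t a : Int) < needed then t
  else kv.2.foldl (fun t e => pvReplaceNthB t a e.toList needed) t

def replace_text_with_alternative_emojis_alt (text : String) : String :=
  String.ofList (pvALT.foldl pvStepB (PySem.Chars.upper text.toList))

-- ===== PRECONDITION & SPEC =====
def Spec_replace_text_with_alternative_emojis (text : String) (out : String) : Prop := out = replace_text_with_alternative_emojis_alt text
instance (text : String) (out : String) : Decidable (Spec_replace_text_with_alternative_emojis text out) := by unfold Spec_replace_text_with_alternative_emojis; infer_instance

-- ===== CLAIM (what is proved, stated in full; the proofs are below) =====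
def Claim_equal_replace_text_with_alternative_emojis : Prop := ∀ (text : String), Dom_replace_text_with_alternative_emojis text → Spec_replace_text_with_alternative_emojis text (replace_text_with_alternative_emojis text)

-- ===== LEMMAS AND PROOFS =====

theorem pv_mem_occ (s sub : List Char) (p : Nat) :
    p ∈ pvOcc s sub ↔ p ≤ s.length ∧ sub <+: s.drop p := by
  simp [pvOcc, List.mem_filter, List.mem_range, PySem.Chars.startswith_iff, Nat.lt_succ_iff]

theorem pv_occ_sorted (s sub : List Char) : (pvOcc s sub).Pairwise (· < ·) :=
  (List.pairwise_lt_range).filter _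

theorem pv_occ_length_le (s sub : List Char) : (pvOcc s sub).length ≤ s.length + 1 :=
  le_trans (List.length_filter_le _ _) (by simp)

theorem pv_filter_after (P : List Nat) (j : Nat) (p : Nat) (rest : List Nat)
    (hs : P.Pairwise (· < ·)) (hd : P.drop j = p :: rest) :
    P.filter (fun q => p + 1 ≤ q) = rest := by
  have h1 : P = P.take j ++ p :: rest := by rw [← hd, List.take_append_drop]
  rw [h1] at hs ⊢
  rw [List.pairwise_append] at hs
  obtain ⟨hpre, hcons, hcross⟩ := hs
  rw [List.filter_append]
  have hpre0 : (P.take j).filter (fun q => p + 1 ≤ q) = [] := by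
    rw [List.filter_eq_nil_iff]
    intro x hx
    have := hcross x hx p (by simp)
    simp; omega
  rw [hpre0]
  rw [List.pairwise_cons] at hcons
  simp only [List.filter_cons]
  have : ¬ (p + 1 ≤ p) := by omega
  simp only [this, decide_eq_true_eq, if_neg, decide_false]
  simp
  exact fun x hx => hcons.1 x hx

theorem pv_one_le_count_go_mono (sub : List Char) : ∀ (fuel : Nat) (l : List Char) (acc : Nat),
    acc ≤ PySem.Chars.count.go sub fuel l acc := by
  intro fuel
  induction fuel with
  | zero => intro l acc; simp [PySem.Chars.count.go]
  | succ f ih =>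
    intro l acc
    cases l with
    | nil => simp [PySem.Chars.count.go]
    | cons h t =>
      rw [PySem.Chars.count.go]
      split
      · exact le_trans (by omega) (ih _ _)
      · exact ih _ _

theorem pv_count_go_lt (sub : List Char) (hsub : sub ≠ []) :
    ∀ (fuel : Nat) (l : List Char) (acc : Nat), l.length ≤ fuel →
    (acc < PySem.Chars.count.go sub fuel l acc ↔ sub <:+: l) := by
  intro fuel
  induction fuel with
  | zero =>
    intro l acc hl
    have : l = [] := by cases l <;> simp_all
    subst this
    simp [PySem.Chars.count.go, List.infix_nil, hsub]
  | succ f ih =>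
    intro l acc hl
    cases l with
    | nil => simp [PySem.Chars.count.go, List.infix_nil, hsub]
    | cons h t =>
      rw [PySem.Chars.count.go]
      split
      · rename_i hpre
        constructor
        · intro _
          exact List.IsInfix.trans (List.isPrefixOf_iff_prefix.mp hpre).isInfix (by simp)
        · intro _
          exact lt_of_lt_of_le (by omega) (pv_one_le_count_go_mono sub f _ (acc + 1))
      · rename_i hpre
        rw [ih t acc (by simpa using Nat.lt_succ_iff.mp (Nat.lt_succ_of_le hl))]
        rw [List.infix_cons_iff]
        simp only [List.isPrefixOf_iff_prefix] at hpre
        simp [hpre]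

theorem pv_one_le_count_iff (t sub : List Char) :
    1 ≤ PySem.Chars.count t sub ↔ sub <:+: t := by
  by_cases hsub : sub = []
  · subst hsub; simp [PySem.Chars.count]
  · rw [PySem.Chars.count]
    simp only [List.isEmpty_iff, hsub, if_false]
    exact pv_count_go_lt sub hsub t.length t 0 le_rfl

theorem pv_head_eq_of_min (F : List Nat) (x : Nat) (hs : F.Pairwise (· < ·))
    (hx : x ∈ F) (hmin : ∀ y ∈ F, x ≤ y) : F.head? = some x := by
  cases F with
  | nil => simp at hx
  | cons a rest =>
    rw [List.pairwise_cons] at hs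
    have h1 : x ≤ a := hmin a (by simp)
    have h2 : a ≤ x := by
      rcases List.mem_cons.mp hx with h | h
      · omega
      · exact le_of_lt (hs.1 x h)
    simp; omega

theorem pv_findFrom_eq (s sub : List Char) (k : Nat) (hk : k ≤ s.length + 1) :
    PySem.Chars.findFrom s sub (k : Int) none =
      match ((pvOcc s sub).filter (fun q => k ≤ q)).head? with
      | some q => (q : Int)
      | none => -1 := by
  by_cases hk2 : k ≤ s.length
  · by_cases hr : PySem.Chars.findFrom s sub (k : Int) none = -1
    · have hno : ¬ sub <:+: s.drop k :=
        (PySem.Chars.findFrom_natCast_eq_neg_one_iff s sub k hk2).mp hr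
      have hfil : (pvOcc s sub).filter (fun q => k ≤ q) = [] := by
        rw [List.filter_eq_nil_iff]
        intro q hq hkq
        simp only [decide_eq_true_eq] at hkq
        obtain ⟨hqlen, hqpre⟩ := (pv_mem_occ s sub q).mp hq
        exact hno (by
          have hdd : s.drop q = (s.drop k).drop (q - k) := by
            rw [List.drop_drop]; congr 1; omega
          rw [hdd] at hqpre
          exact hqpre.isInfix.trans (List.drop_suffix _ _).isInfix)
      rw [hfil, hr]
      rfl
    · obtain ⟨hkr, hpre, hmin⟩ := PySem.Chars.findFrom_natCast_spec s sub k hk2 hr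
      set r := PySem.Chars.findFrom s sub (k : Int) none with hrdef
      have hrlen : r ≤ s.length := by
        rw [hrdef, PySem.Chars.findFrom_natCast s sub k hk2]
        split
        · omega
        · have := PySem.Chars.find_le_length (s.drop k) sub
          simp at this ⊢
          omega
      have hr0 : 0 ≤ r := le_trans (by omega) hkr
      have hrmem : r.toNat ∈ (pvOcc s sub).filter (fun q => k ≤ q) := by
        rw [List.mem_filter]
        refine ⟨(pv_mem_occ s sub r.toNat).mpr ⟨by omega, hpre⟩, by simp; omega⟩
      have hhead : ((pvOcc s sub).filter (fun q => k ≤ q)).head? = some r.toNat := by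
        apply pv_head_eq_of_min _ _ ((pv_occ_sorted s sub).filter _) hrmem
        intro y hy
        rw [List.mem_filter] at hy
        obtain ⟨hyo, hky⟩ := hy
        simp only [decide_eq_true_eq] at hky
        by_contra hlt
        exact hmin y hky (by omega) ((pv_mem_occ s sub y).mp hyo).2
      rw [hhead]
      simp; omega
  · have hkeq : k = s.length + 1 := by omega
    have h1 : PySem.Chars.findFrom s sub (k : Int) none = -1 := by
      simp only [PySem.Chars.findFrom, hkeq]
      push_cast
      rw [if_neg (show ¬((s.length : Int) + 1 < 0) by omega)]
      rw [if_pos (show (s.length : Int) < (s.length : Int) + 1 by omega)]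
    have hfil : (pvOcc s sub).filter (fun q => k ≤ q) = [] := by
      rw [List.filter_eq_nil_iff]
      intro q hq hkq
      simp only [decide_eq_true_eq] at hkq
      have := ((pv_mem_occ s sub q).mp hq).1
      omega
    rw [hfil, h1]
    rfl

theorem pv_loop_neg (s sub : List Char) (n : Int) (fuel : Nat) (i : Int) :
    pvReplLoopA s sub n fuel (-1) i = (-1, i) := by
  cases fuel <;> simp [pvReplLoopA]

theorem pv_loop_spec (s sub : List Char) (n : Int) :
    ∀ (rest : List Nat) (fuel j p : Nat),
    (pvOcc s sub).drop j = p :: rest → rest.length + 1 ≤ fuel →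
    pvReplLoopA s sub n fuel (p : Int) ((j : Int) + 1) =
      match (p :: rest)[(n - ((j : Int) + 1)).toNat]? with
      | some q => if (j : Int) + 1 ≤ n then ((q : Int), n)
                  else (-1, (j : Int) + 1 + (rest.length + 1))
      | none => (-1, (j : Int) + 1 + (rest.length + 1)) := by
  intro rest
  induction rest with
  | nil =>
    intro fuel j p hd hfuel
    obtain ⟨f, rfl⟩ : ∃ f, fuel = f + 1 := ⟨fuel - 1, by omega⟩
    have hpmem : p ∈ pvOcc s sub := List.mem_of_mem_drop (by rw [hd]; simp)
    have hplen : p ≤ s.length := ((pv_mem_occ s sub p).mp hpmem).1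
    by_cases hn : (j : Int) + 1 = n
    · rw [pvReplLoopA]
      rw [if_neg (by simp [hn])]
      have : (n - ((j : Int) + 1)).toNat = 0 := by omega
      simp [this, hn]
    · rw [pvReplLoopA]
      rw [if_pos ⟨by omega, hn⟩]
      have hff : PySem.Chars.findFrom s sub ((p : Int) + 1) none = -1 := by
        have := pv_findFrom_eq s sub (p + 1) (by omega)
        rw [pv_filter_after (pvOcc s sub) j p [] (pv_occ_sorted s sub) hd] at this
        push_cast at this ⊢
        rw [this]
        rfl
      rw [hff, pv_loop_neg]
      by_cases hlt : (j : Int) + 1 ≤ n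
      · have : 1 ≤ (n - ((j : Int) + 1)).toNat := by omega
        rw [List.getElem?_cons]
        rw [if_neg (by omega)]
        simp only [List.getElem?_nil, List.length_nil]
        norm_num
      · have : (n - ((j : Int) + 1)).toNat = 0 := by omega
        simp only [this, List.getElem?_cons_zero, List.length_nil]
        rw [if_neg hlt]
        norm_num
  | cons q rest' ih =>
    intro fuel j p hd hfuel
    obtain ⟨f, rfl⟩ : ∃ f, fuel = f + 1 := ⟨fuel - 1, by omega⟩
    have hpmem : p ∈ pvOcc s sub := List.mem_of_mem_drop (by rw [hd]; simp)
    have hplen : p ≤ s.length := ((pv_mem_occ s sub p).mp hpmem).1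
    by_cases hn : (j : Int) + 1 = n
    · rw [pvReplLoopA]
      rw [if_neg (by simp [hn])]
      have : (n - ((j : Int) + 1)).toNat = 0 := by omega
      simp [this, hn]
    · rw [pvReplLoopA]
      rw [if_pos ⟨by omega, hn⟩]
      have hff : PySem.Chars.findFrom s sub ((p : Int) + 1) none = (q : Int) := by
        have := pv_findFrom_eq s sub (p + 1) (by omega)
        rw [pv_filter_after (pvOcc s sub) j p (q :: rest') (pv_occ_sorted s sub) hd] at this
        push_cast at this ⊢
        rw [this]
        rfl
      have hd' : (pvOcc s sub).drop (j + 1) = q :: rest' := by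
        have : (pvOcc s sub).drop (j + 1) = ((pvOcc s sub).drop j).drop 1 := by
          rw [List.drop_drop]
        rw [this, hd]
        rfl
      have ihx := ih f (j + 1) q hd' (by simpa using hfuel)
      rw [hff]
      have hcast : ((j : Int) + 1 + 1) = (((j + 1 : Nat) : Int) + 1) := by push_cast; ring
      rw [hcast, ihx]
      by_cases hlt : (j : Int) + 1 ≤ n
      · have hge : (j : Int) + 2 ≤ n := by omega
        have h1 : (n - ((j : Int) + 1)).toNat = (n - (((j + 1 : Nat) : Int) + 1)).toNat + 1 := by
          push_cast; omega
        rw [h1, List.getElem?_cons_succ]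
        cases hq : (q :: rest')[(n - (((j + 1 : Nat) : Int) + 1)).toNat]? with
        | none => simp only []; push_cast; norm_num; omega
        | some x =>
          simp only []
          rw [if_pos (by push_cast; omega), if_pos hlt]
      · have h0 : (n - ((j : Int) + 1)).toNat = 0 := by omega
        have h0' : (n - (((j + 1 : Nat) : Int) + 1)).toNat = 0 := by push_cast; omega
        rw [h0, h0', List.getElem?_cons_zero, List.getElem?_cons_zero]
        simp only []
        rw [if_neg hlt, if_neg (by push_cast; omega)]
        simp only [List.length_cons]
        norm_num
        push_cast
        omega

theorem pv_replaceNth_eq (s sub repl : List Char) (n : Int) :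
    pvReplaceNthA s sub repl n = pvReplaceNthB s sub repl n := by
  have hfind : PySem.Chars.find s sub = (match (pvOcc s sub).head? with
      | some q => (q : Int) | none => -1) := by
    have h := pv_findFrom_eq s sub 0 (by omega)
    have hf : (pvOcc s sub).filter (fun q => decide (0 ≤ q)) = pvOcc s sub :=
      List.filter_eq_self.mpr (fun x _ => by simp)
    rw [show ((0 : Nat) : Int) = 0 from rfl, PySem.Chars.findFrom_zero] at h
    rw [h]
    simp
  cases hP : pvOcc s sub with
  | nil =>
    rw [hP] at hfind
    simp only [List.head?_nil] at hfind
    have h0 : pvReplaceNthA s sub repl n = s := by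
      simp only [pvReplaceNthA, hfind]
      norm_num [pv_loop_neg]
    have h1 : pvReplaceNthB s sub repl n = s := by
      simp only [pvReplaceNthB, hP]
      rw [if_pos (by norm_num; omega)]
    rw [h0, h1]
  | cons p rest =>
    rw [hP] at hfind
    simp only [List.head?_cons] at hfind
    have hp1 : ((p : Nat) : Int) ≠ -1 := by
      have : (0:Int) ≤ (p : Int) := Int.natCast_nonneg p
      omega
    have hlen : rest.length + 1 ≤ s.length + 1 := by
      have := pv_occ_length_le s sub
      rw [hP] at this
      simpa using this
    have hloop := pv_loop_spec s sub n rest (s.length + 2) 0 p (by rw [List.drop_zero, hP]) (by omega)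
    norm_num at hloop
    cases hq : (p :: rest)[n.toNat - 1]? with
    | some q =>
      rw [hq] at hloop
      simp only [] at hloop
      by_cases hn : 1 ≤ n
      · rw [if_pos hn] at hloop
        have hidx : n.toNat - 1 < (p :: rest).length := (List.getElem?_eq_some_iff.mp hq).1
        simp only [List.length_cons] at hidx
        have h0 : pvReplaceNthA s sub repl n =
            PySem.List.slice s none (some (q : Int)) ++ repl ++
              PySem.List.slice s (some ((q : Int) + (sub.length : Int))) none := by
          simp only [pvReplaceNthA, hfind]
          rw [if_pos hp1, hloop]
          rw [if_pos ⟨by positivity, rfl⟩]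
        have h1 : pvReplaceNthB s sub repl n =
            s.take q ++ repl ++ s.drop (q + sub.length) := by
          simp only [pvReplaceNthB, hP]
          rw [if_neg (by simp only [List.length_cons]; push_cast; omega)]
          rw [show (n - 1).toNat = n.toNat - 1 from Int.pred_toNat n]
          rw [hq]
        rw [h0, h1, PySem.List.slice_to s (by positivity), PySem.List.slice_from s (by positivity),
            show ((q : Int)).toNat = q from by omega,
            show ((q : Int) + (sub.length : Int)).toNat = q + sub.length from by omega]
      · rw [if_neg hn] at hloop
        have h0 : pvReplaceNthA s sub repl n = s := by
          simp only [pvReplaceNthA, hfind]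
          rw [if_pos hp1, hloop]
          rw [if_neg (by norm_num)]
        have h1 : pvReplaceNthB s sub repl n = s := by
          simp only [pvReplaceNthB, hP]
          rw [if_pos (Or.inl (by omega))]
        rw [h0, h1]
    | none =>
      rw [hq] at hloop
      simp only [] at hloop
      have hnone : (p :: rest).length ≤ n.toNat - 1 := List.getElem?_eq_none_iff.mp hq
      simp only [List.length_cons] at hnone
      have h0 : pvReplaceNthA s sub repl n = s := by
        simp only [pvReplaceNthA, hfind]
        rw [if_pos hp1, hloop]
        rw [if_neg (by norm_num)]
      have h1 : pvReplaceNthB s sub repl n = s := by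
        simp only [pvReplaceNthB, hP]
        rw [if_pos (by simp only [List.length_cons]; push_cast; omega)]
      rw [h0, h1]

theorem pv_step_eq (t : List Char) (kv : String × List String) :
    pvStepA t kv = pvStepB t kv := by
  have hrepl : pvReplaceNthA = pvReplaceNthB :=
    funext fun s => funext fun sub => funext fun r => funext fun n => pv_replaceNth_eq s sub r n
  unfold pvStepA pvStepB
  simp only [hrepl, Bool.and_comm (kv.1.toList.length == 1) (PySem.Chars.strIsalpha kv.1.toList)]
  set a := kv.1.toList with ha
  have hcnt := pv_one_le_count_iff t a
  by_cases hin : PySem.Chars.isIn a t = true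
  · have h1 : 1 ≤ PySem.Chars.count t a := hcnt.mpr ((PySem.Chars.isIn_iff_infix a t).mp hin)
    rw [if_neg (by rw [hin]; simp)]
    cases hiso : PySem.Chars.strIsalpha a && (a.length == 1) with
    | false =>
      rw [if_neg (show ¬((false && decide (PySem.Chars.count t a < 2)) = true) by simp)]
      rw [if_neg (show ¬((PySem.Chars.count t a : Int) <
            if (false = true) then 2 else 1) by simp; omega)]
    | true =>
      by_cases hc : PySem.Chars.count t a < 2
      · rw [if_pos (show (true && decide (PySem.Chars.count t a < 2)) = true by simp [hc])]
        rw [if_pos (show ((PySem.Chars.count t a : Int) <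
              if (true = true) then 2 else 1) by simp; omega)]
      · rw [if_neg (show ¬((true && decide (PySem.Chars.count t a < 2)) = true) by simp [hc])]
        rw [if_neg (show ¬((PySem.Chars.count t a : Int) <
              if (true = true) then 2 else 1) by simp; omega)]
  · have h0 : PySem.Chars.count t a = 0 := by
      by_contra h
      exact hin ((PySem.Chars.isIn_iff_infix a t).mpr (hcnt.mp (by omega)))
    rw [if_pos (by simp only [Bool.not_eq_true] at hin; rw [hin])]
    cases hiso : PySem.Chars.strIsalpha a && (a.length == 1) with
    | false =>
      rw [if_pos (show ((PySem.Chars.count t a : Int) <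
            if (false = true) then 2 else 1) by rw [h0]; simp)]
    | true =>
      rw [if_pos (show ((PySem.Chars.count t a : Int) <
            if (true = true) then 2 else 1) by rw [h0]; simp)]

-- ===== VERDICT (by name: the statement is the Claim_ definition above) =====
theorem replace_text_with_alternative_emojis_spec : Claim_equal_replace_text_with_alternative_emojis := by
  intro text _
  unfold Spec_replace_text_with_alternative_emojis
  unfold replace_text_with_alternative_emojis replace_text_with_alternative_emojis_alt
  rw [show pvStepA = pvStepB from funext fun t => funext fun kv => pv_step_eq t kv]
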